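-- pv_equiv track=rewrite | github.com/suisuisi/FPGA_Library | ThreePart/ISOIEC18033-3StandardBlock/glitchy-clock_generator/glitchy-clock_generator/source/generator_sample_program/utility.py | intToUint16List
-- ===== SOURCE A (Python) =====
-- def intToUint16List(x):
--     import copy
--     a = copy.copy(x)
--     list = []
--     for i in range(32):
--         list.append(a % 65536)
--         a = a >> 16
--     list.reverse()
--     return list
-- ===== SOURCE B (Python) =====
-- def intToUint16List(x):
--     # Divide and conquer: split the value by divmod at the half-width boundary and
--     # recurse on each half, gluing high-half words before low-half words.
--     def words(n, count):
--         if count == 1: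
--             return [n % 65536]
--         half = count // 2
--         hi, lo = divmod(n, 1 << (16 * half))
--         return words(hi, count - half) + words(lo, half)
--     return words(x, 32)
-- ===== Notes on version B (the rewrite author's own statement) =====
-- stated objective: alternative
-- what changed: Replaces the fixed-length iterate-shift-accumulate-then-reverse loop with a divide-and-conquer recursion that splits the value by one divmod at the half-width boundary and concatenates the recursively computed high and low halves, so there is no mutable accumulator, no index loop and no final reverse.
import Mathlib
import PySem

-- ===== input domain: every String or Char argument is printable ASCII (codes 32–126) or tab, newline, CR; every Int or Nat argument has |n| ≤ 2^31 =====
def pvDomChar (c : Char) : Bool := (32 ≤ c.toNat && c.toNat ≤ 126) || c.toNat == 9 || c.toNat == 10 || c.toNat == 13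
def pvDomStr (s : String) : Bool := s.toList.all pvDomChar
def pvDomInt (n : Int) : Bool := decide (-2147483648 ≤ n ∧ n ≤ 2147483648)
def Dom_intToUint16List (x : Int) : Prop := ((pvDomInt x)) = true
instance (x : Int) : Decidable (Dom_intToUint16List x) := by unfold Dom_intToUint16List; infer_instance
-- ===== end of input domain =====

-- B replaces A's 32-step shift-accumulate loop plus final reverse with a divide-and-conquer
-- recursion splitting the value by one divmod at the half-width boundary (objective: alternative).

-- ===== PORT A =====
-- a = copy.copy(x) is a no-op for ints; loop state is (a, list); 'a >> 16' is floor division by 2^16.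
def intToUint16List (x : Int) : List Int :=
  let st := (PySem.List.pyRange 0 32 1).foldl
    (fun (st : Int × List Int) (_ : Int) =>
      (PySem.Int.floordiv st.1 65536, st.2 ++ [PySem.Int.mod st.1 65536])) (x, [])
  st.2.reverse

-- ===== PORT B =====
-- words(n, count): divmod(n, 1 << 16*half) = (floordiv, mod) since the divisor is positive.
-- The 'count = 0' branch is a totality guard only: the entry call count = 32 never reaches it.
def pvWords (n : Int) (count : Nat) : List Int :=
  if count = 1 then [PySem.Int.mod n 65536]
  else if count = 0 then []
  else
    let half := count / 2
    let m : Int := 2 ^ (16 * half)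
    pvWords (PySem.Int.floordiv n m) (count - half) ++ pvWords (PySem.Int.mod n m) half
termination_by count
decreasing_by all_goals omega

def intToUint16List_alt (x : Int) : List Int := pvWords x 32

-- ===== PRECONDITION & SPEC =====
def Spec_intToUint16List (x : Int) (out : List Int) : Prop := out = intToUint16List_alt x
instance (x : Int) (out : List Int) : Decidable (Spec_intToUint16List x out) := by unfold Spec_intToUint16List; infer_instance

-- ===== CLAIM (what is proved, stated in full; the proofs are below) =====
def Claim_equal_intToUint16List : Prop := ∀ (x : Int), Dom_intToUint16List x → Spec_intToUint16List x (intToUint16List x)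

-- ===== LEMMAS AND PROOFS =====

-- the value of the i-th word (counted from the least-significant end)
def pvWord (n : Int) (i : Nat) : Int :=
  PySem.Int.mod (PySem.Int.floordiv n (2 ^ (16 * i))) 65536

theorem pv_fdiv_fdiv (x : Int) (a b : Nat) :
    PySem.Int.floordiv (PySem.Int.floordiv x (2 ^ a)) (2 ^ b) = PySem.Int.floordiv x (2 ^ (a + b)) := by
  rw [PySem.Int.floordiv_eq_ediv_of_pos (b := (2:Int) ^ a) (by positivity),
      PySem.Int.floordiv_eq_ediv_of_pos (b := (2:Int) ^ b) (by positivity),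
      PySem.Int.floordiv_eq_ediv_of_pos (b := (2:Int) ^ (a + b)) (by positivity),
      Int.ediv_ediv_of_nonneg (by positivity)]
  rw [pow_add]

theorem pv_word_fdiv (n : Int) (h i : Nat) :
    pvWord (PySem.Int.floordiv n (2 ^ (16 * h))) i = pvWord n (h + i) := by
  unfold pvWord
  rw [pv_fdiv_fdiv, ← Nat.mul_add]

theorem pv_word_mod (n : Int) (h i : Nat) (hlt : i < h) :
    pvWord (PySem.Int.mod n (2 ^ (16 * h))) i = pvWord n i := by
  unfold pvWord
  have hk : (0:Int) < 2 ^ (16 * i) := by positivity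
  rw [PySem.Int.mod_eq_emod_of_pos (by positivity),
      PySem.Int.floordiv_eq_ediv_of_pos hk, PySem.Int.floordiv_eq_ediv_of_pos hk,
      PySem.Int.mod_eq_emod_of_pos (by norm_num), PySem.Int.mod_eq_emod_of_pos (by norm_num)]
  have hR : (2:Int) ^ (16 * h) = 2 ^ 16 * 2 ^ (16 * h - 16 * i - 16) * 2 ^ (16 * i) := by
    rw [← pow_add, ← pow_add]; congr 1; omega
  have key : n % 2 ^ (16 * h) =
      n + (-(2 ^ 16 * 2 ^ (16 * h - 16 * i - 16) * (n / 2 ^ (16 * h)))) * 2 ^ (16 * i) := by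
    rw [Int.emod_def, hR]
    ring
  rw [key, Int.add_mul_ediv_right _ _ (ne_of_gt hk)]
  have hre : n / 2 ^ (16 * i) + -(2 ^ 16 * 2 ^ (16 * h - 16 * i - 16) * (n / 2 ^ (16 * h))) =
      n / 2 ^ (16 * i) + 65536 * -((2:Int) ^ (16 * h - 16 * i - 16) * (n / 2 ^ (16 * h))) := by
    ring
  rw [hre, Int.add_mul_emod_self_left]

-- the divide-and-conquer recursion produces exactly the reversed little-endian word map
theorem pvWords_eq (count : Nat) (hc : 1 ≤ count) (n : Int) :
    pvWords n count = ((List.range count).map (pvWord n)).reverse := by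
  induction count using Nat.strong_induction_on generalizing n with
  | _ count ih =>
    rw [pvWords]
    by_cases h1 : count = 1
    · subst h1
      simp [pvWord, List.range_succ]
    · have h0 : count ≠ 0 := by omega
      simp only [h1, h0, if_false]
      have hhalf1 : 1 ≤ count / 2 := by omega
      have hrest1 : 1 ≤ count - count / 2 := by omega
      rw [ih (count - count / 2) (by omega) hrest1, ih (count / 2) (by omega) hhalf1]
      have hsplit : count = count / 2 + (count - count / 2) := by omega
      conv_rhs => rw [hsplit, List.range_add]
      rw [List.map_append, List.reverse_append, List.map_map]
      congr 1
      · apply congrArg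
        apply List.map_congr_left
        intro i _
        simpa using pv_word_fdiv n (count / 2) i
      · apply congrArg
        apply List.map_congr_left
        intro i hi
        exact pv_word_mod n (count / 2) i (List.mem_range.mp hi)

-- A's fold characterised: after n steps the accumulator is x >> 16n and the list holds words 0..n-1
theorem pv_foldA (n : Nat) (x : Int) (l : List Int) :
    (List.range n).foldl
      (fun (st : Int × List Int) (_ : Nat) =>
        (PySem.Int.floordiv st.1 65536, st.2 ++ [PySem.Int.mod st.1 65536])) (x, l) =
    (PySem.Int.floordiv x (2 ^ (16 * n)), l ++ (List.range n).map (pvWord x)) := by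
  induction n with
  | zero =>
      simp
  | succ n ih =>
      rw [List.range_succ, List.foldl_append, ih]
      simp only [List.foldl_cons, List.foldl_nil, List.map_append, List.map_cons, List.map_nil]
      refine Prod.ext ?_ ?_
      · show PySem.Int.floordiv (PySem.Int.floordiv x (2 ^ (16 * n))) 65536 = _
        have := pv_fdiv_fdiv x (16 * n) 16
        norm_num at this ⊢
        rw [this, Nat.mul_succ]
      · simp [pvWord]

-- ===== VERDICT (by name: the statement is the Claim_ definition above) =====
theorem intToUint16List_spec : Claim_equal_intToUint16List := by
  intro x _
  unfold Spec_intToUint16List intToUint16List intToUint16List_alt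
  rw [pvWords_eq 32 (by norm_num) x, PySem.List.pyRange_one]
  rw [show ((32:Int) - 0).toNat = 32 from rfl]
  simp only [List.foldl_map]
  rw [pv_foldA 32 x []]
  simp
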